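-- pv_equiv track=rewrite | github.com/hongii/programmers_python | LV 2/땅따먹기.py | solution
-- ===== SOURCE A (Python) =====
-- def solution(land):
--     n = len(land)
--     dp = [[0]*4 for _ in range(n)]
--     for j in range(4): # dp 초기화
--         dp[0][j] = land[0][j]
--
--     for i in range(1, n):
--         dp[i][0] = max(dp[i-1][1], dp[i-1][2], dp[i-1][3]) + land[i][0]
--         dp[i][1] = max(dp[i-1][0], dp[i-1][2], dp[i-1][3]) + land[i][1]
--         dp[i][2] = max(dp[i-1][0], dp[i-1][1], dp[i-1][3]) + land[i][2]
--         dp[i][3] = max(dp[i-1][0], dp[i-1][1], dp[i-1][2]) + land[i][3]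
--     return max(dp[n-1])
-- ===== SOURCE B (Python) =====
-- def solution(land):
--     # Divide & conquer: each block of rows is summarised by a 4x4 matrix
--     # M[a][b] = best sum through the block entering at column a and leaving at
--     # column b (None = impossible); blocks combine by a (max,+) product that
--     # forbids equal columns at the junction.
--     def vmax(x, y):
--         if x is None:
--             return y
--         if y is None:
--             return x
--         return max(x, y)
--
--     def vadd(x, y):
--         if x is None or y is None:
--             return None
--         return x + y
--
--     def leaf(r):
--         return tuple(tuple(r[a] if a == b else None for b in range(4)) for a in range(4))
--
--     def combine(L, R):
--         out = []
--         for a in range(4):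
--             row = []
--             for b in range(4):
--                 e = None
--                 for x in range(4):
--                     for y in range(4):
--                         if x != y:
--                             e = vmax(e, vadd(L[a][x], R[y][b]))
--                 row.append(e)
--             out.append(tuple(row))
--         return tuple(out)
--
--     def block(lo, hi):
--         if hi - lo == 1:
--             return leaf(land[lo])
--         mid = (lo + hi) // 2
--         return combine(block(lo, mid), block(mid, hi))
--
--     M = block(0, len(land))
--     best = None
--     for a in range(4):
--         for b in range(4):
--             best = vmax(best, M[a][b])
--     return best
-- ===== Notes on version B (the rewrite author's own statement) =====
-- stated objective: alternative
-- what changed: B replaces A's row-by-row DP table with a divide-and-conquer algorithm: each block of rows is summarised by a 4x4 (entry column, exit column) best-sum matrix and blocks are merged with a (max,+) matrix product that forbids equal columns at the junction.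
import Mathlib
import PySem

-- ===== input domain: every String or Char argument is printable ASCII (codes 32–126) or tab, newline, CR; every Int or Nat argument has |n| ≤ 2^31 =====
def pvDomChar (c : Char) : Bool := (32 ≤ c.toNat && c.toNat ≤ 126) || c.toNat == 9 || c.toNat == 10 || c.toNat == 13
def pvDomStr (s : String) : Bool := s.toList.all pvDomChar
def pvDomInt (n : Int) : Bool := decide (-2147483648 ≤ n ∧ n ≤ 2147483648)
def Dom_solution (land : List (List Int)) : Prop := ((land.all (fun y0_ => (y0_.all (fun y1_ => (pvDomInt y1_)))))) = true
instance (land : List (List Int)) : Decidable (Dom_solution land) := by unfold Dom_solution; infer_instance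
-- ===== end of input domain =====

-- B replaces A's row-by-row DP with divide & conquer over blocks of rows, each block
-- summarised by a 4x4 (entry column, exit column) best-sum matrix; same asymptotic cost.

-- land[i][j] for a nonnegative in-range index, totalised with 0 outside Pre_solution
-- (where the Python raises IndexError)
def pvGet (r : List Int) (j : Nat) : Int := (PySem.List.pyGet? r (j : Int)).getD 0

-- ===== PORT A =====
-- dp[0][j] = land[0][j] for j in range(4)
def pvInitA (r : List Int) : Int × Int × Int × Int :=
  (pvGet r 0, pvGet r 1, pvGet r 2, pvGet r 3)

-- one iteration of A's loop: the four 3-element maxes over the previous dp row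
def pvStepA (p : Int × Int × Int × Int) (r : List Int) : Int × Int × Int × Int :=
  match p with
  | (a, b, c, d) =>
    (max b (max c d) + pvGet r 0,
     max a (max c d) + pvGet r 1,
     max a (max b d) + pvGet r 2,
     max a (max b c) + pvGet r 3)

def solution (land : List (List Int)) : Int :=
  match land with
  | [] => 0   -- unreachable under Pre_solution (Python raises IndexError on [])
  | r0 :: rest =>
    match rest.foldl pvStepA (pvInitA r0) with
    | (a, b, c, d) => max a (max b (max c d))

-- ===== PORT B =====
-- vmax: max of two optional values, None = "impossible" (Python's vmax helper)
def pvVMax : Option Int → Option Int → Option Int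
  | none, y => y
  | some a, none => some a
  | some a, some b => some (max a b)

-- vadd: sum of two optional values, absorbing None (Python's vadd helper)
def pvVAdd : Option Int → Option Int → Option Int
  | some a, some b => some (a + b)
  | _, _ => none

-- a block summary: M a b = best sum entering at column a, leaving at column b
abbrev pvMat := Fin 4 → Fin 4 → Option Int

-- the (x, y) pairs visited by Python's nested 'for x … for y … if x != y' loops, in order
def pvPairs : List (Fin 4 × Fin 4) :=
  [(0,1),(0,2),(0,3),(1,0),(1,2),(1,3),(2,0),(2,1),(2,3),(3,0),(3,1),(3,2)]

-- Python's combine: junction forbids equal columns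
def pvCombine (L R : pvMat) : pvMat := fun a b =>
  pvPairs.foldl (fun e xy => pvVMax e (pvVAdd (L a xy.1) (R xy.2 b))) none

-- Python's leaf: a single row r
def pvLeaf (r : List Int) : pvMat := fun a b =>
  if a = b then some (pvGet r a.val) else none

-- Python's block(lo, hi), recursing on the row list itself (same splits: len/2)
def pvBlock : List (List Int) → pvMat
  | [] => fun _ _ => none   -- unreachable: Python's recursion never reaches an empty block under Pre_solution
  | [r] => pvLeaf r
  | r1 :: r2 :: rest =>
    pvCombine
      (pvBlock ((r1 :: r2 :: rest).take ((r1 :: r2 :: rest).length / 2)))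
      (pvBlock ((r1 :: r2 :: rest).drop ((r1 :: r2 :: rest).length / 2)))
termination_by rows => rows.length
decreasing_by
  · simp; omega
  · simp; omega

-- the (a, b) cells visited by Python's final 'for a … for b …' loops, in order
def pvCells : List (Fin 4 × Fin 4) :=
  [(0,0),(0,1),(0,2),(0,3),(1,0),(1,1),(1,2),(1,3),
   (2,0),(2,1),(2,2),(2,3),(3,0),(3,1),(3,2),(3,3)]

def solution_alt (land : List (List Int)) : Int :=
  (pvCells.foldl (fun e ab => pvVMax e (pvBlock land ab.1 ab.2)) none).getD 0
  -- .getD 0 only unwraps: under Pre_solution the loop's best is always some value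

-- ===== PRECONDITION & SPEC =====
-- Pre_ excludes exactly the inputs on which the Python A raises IndexError: the empty
-- list and rows with fewer than 4 columns.
def Pre_solution (land : List (List Int)) : Prop :=
  land ≠ [] ∧ ∀ r ∈ land, 4 ≤ r.length
instance (land : List (List Int)) : Decidable (Pre_solution land) := by unfold Pre_solution; infer_instance

def pvWitness_solution : List (List Int) := [[1, 2, 3, 5], [5, 6, 7, 8], [4, 3, 2, 1]]

def Spec_solution (land : List (List Int)) (out : Int) : Prop := out = solution_alt land
instance (land : List (List Int)) (out : Int) : Decidable (Spec_solution land out) := by unfold Spec_solution; infer_instance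

-- ===== CLAIM (what is proved, stated in full; the proofs are below) =====
def Claim_equal_solution : Prop :=
  ∀ (land : List (List Int)), Dom_solution land → Pre_solution land → Spec_solution land (solution land)

-- ===== LEMMAS AND PROOFS =====

-- ---- algebra of pvVMax / pvVAdd ----
theorem vmax_none_left (x : Option Int) : pvVMax none x = x := rfl
theorem vmax_none_right (x : Option Int) : pvVMax x none = x := by cases x <;> rfl
theorem vmax_comm (x y : Option Int) : pvVMax x y = pvVMax y x := by
  cases x <;> cases y <;> simp [pvVMax, max_comm]
theorem vmax_assoc (x y z : Option Int) : pvVMax (pvVMax x y) z = pvVMax x (pvVMax y z) := by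
  cases x <;> cases y <;> cases z <;> simp [pvVMax, max_assoc]
theorem vmax_left_comm (x y z : Option Int) : pvVMax x (pvVMax y z) = pvVMax y (pvVMax x z) := by
  rw [← vmax_assoc, vmax_comm x y, vmax_assoc]
theorem vmax_right_comm (x y z : Option Int) : pvVMax (pvVMax x y) z = pvVMax (pvVMax x z) y := by
  rw [vmax_assoc, vmax_comm y z, vmax_assoc]

theorem vadd_none_left (x : Option Int) : pvVAdd none x = none := rfl
theorem vadd_none_right (x : Option Int) : pvVAdd x none = none := by cases x <;> rfl
theorem pvVAdd_assoc (x y z : Option Int) : pvVAdd (pvVAdd x y) z = pvVAdd x (pvVAdd y z) := by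
  cases x <;> cases y <;> cases z <;> simp [pvVAdd, add_assoc]
theorem vadd_vmax_right (x y c : Option Int) :
    pvVAdd (pvVMax x y) c = pvVMax (pvVAdd x c) (pvVAdd y c) := by
  cases x <;> cases y <;> cases c <;> simp [pvVAdd, pvVMax, max_add_add_right]
theorem vadd_vmax_left (c x y : Option Int) :
    pvVAdd c (pvVMax x y) = pvVMax (pvVAdd c x) (pvVAdd c y) := by
  cases x <;> cases y <;> cases c <;> simp [pvVAdd, pvVMax, max_add_add_left]

-- ---- folds of pvVMax ----
def pvFoldMax (l : List (Option Int)) : Option Int := l.foldl pvVMax none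

theorem foldl_vmax_acc (l : List (Option Int)) (a : Option Int) :
    l.foldl pvVMax a = pvVMax a (pvFoldMax l) := by
  induction l generalizing a with
  | nil => simp [pvFoldMax, vmax_none_right]
  | cons h t ih =>
    simp only [pvFoldMax, List.foldl_cons, vmax_none_left]
    rw [ih, ih h, ← vmax_assoc]

theorem pvFoldMax_cons (h : Option Int) (t : List (Option Int)) :
    pvFoldMax (h :: t) = pvVMax h (pvFoldMax t) := by
  simp only [pvFoldMax, List.foldl_cons, vmax_none_left]
  exact foldl_vmax_acc t h

theorem pvFoldMax_append (l₁ l₂ : List (Option Int)) :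
    pvFoldMax (l₁ ++ l₂) = pvVMax (pvFoldMax l₁) (pvFoldMax l₂) := by
  simp only [pvFoldMax, List.foldl_append]
  exact foldl_vmax_acc l₂ (List.foldl pvVMax none l₁)

theorem vadd_foldMax_right (l : List (Option Int)) (c : Option Int) :
    pvVAdd (pvFoldMax l) c = pvFoldMax (l.map (fun x => pvVAdd x c)) := by
  induction l with
  | nil => simp [pvFoldMax, vadd_none_left]
  | cons h t ih => rw [pvFoldMax_cons, vadd_vmax_right, ih, List.map_cons, pvFoldMax_cons]

theorem vadd_foldMax_left (c : Option Int) (l : List (Option Int)) :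
    pvVAdd c (pvFoldMax l) = pvFoldMax (l.map (fun x => pvVAdd c x)) := by
  induction l with
  | nil => simp [pvFoldMax, vadd_none_right]
  | cons h t ih => rw [pvFoldMax_cons, vadd_vmax_left, ih, List.map_cons, pvFoldMax_cons]

theorem pvFoldMax_flatten {α : Type} (l : List α) (g : α → List (Option Int)) :
    pvFoldMax (l.map (fun x => pvFoldMax (g x))) = pvFoldMax (l.flatMap g) := by
  induction l with
  | nil => rfl
  | cons h t ih =>
    rw [List.map_cons, pvFoldMax_cons, ih, List.flatMap_cons, pvFoldMax_append]

theorem pvFoldMax_perm (l₁ l₂ : List (Option Int)) (h : l₁.Perm l₂) :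
    pvFoldMax l₁ = pvFoldMax l₂ := by
  have key : ∀ a, l₁.foldl pvVMax a = l₂.foldl pvVMax a := by
    induction h with
    | nil => intro a; rfl
    | cons x _ ih => intro a; simp only [List.foldl_cons]; exact ih _
    | swap x y l => intro a; simp only [List.foldl_cons, vmax_right_comm]
    | trans _ _ ih₁ ih₂ => intro a; rw [ih₁, ih₂]
  exact key none

-- ---- pvCombine as a fold over a mapped index list ----
theorem pvCombine_eq_foldMax (L R : pvMat) (a b : Fin 4) :
    pvCombine L R a b = pvFoldMax (pvPairs.map (fun xy => pvVAdd (L a xy.1) (R xy.2 b))) := by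
  simp only [pvCombine, pvFoldMax, List.foldl_map]

-- ---- associativity of pvCombine ----
theorem pvCombine_assoc (A B C : pvMat) :
    pvCombine (pvCombine A B) C = pvCombine A (pvCombine B C) := by
  funext a b
  rw [pvCombine_eq_foldMax, pvCombine_eq_foldMax]
  simp only [pvCombine_eq_foldMax, vadd_foldMax_right, vadd_foldMax_left, List.map_map,
    Function.comp_def]
  rw [pvFoldMax_flatten, pvFoldMax_flatten]
  simp only [pvVAdd_assoc]
  apply pvFoldMax_perm
  have e1 : (pvPairs.flatMap fun xy => List.map (fun x => pvVAdd (A a x.1) (pvVAdd (B x.2 xy.1) (C xy.2 b))) pvPairs)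
      = (pvPairs.flatMap fun xy => pvPairs.map fun uv => (uv, xy)).map
          (fun p => pvVAdd (A a p.1.1) (pvVAdd (B p.1.2 p.2.1) (C p.2.2 b))) := by
    simp [List.map_flatMap, List.map_map, Function.comp_def]
  have e2 : (pvPairs.flatMap fun xy => List.map (fun x => pvVAdd (A a xy.1) (pvVAdd (B xy.2 x.1) (C x.2 b))) pvPairs)
      = (pvPairs.flatMap fun uv => pvPairs.map fun xy => (uv, xy)).map
          (fun p => pvVAdd (A a p.1.1) (pvVAdd (B p.1.2 p.2.1) (C p.2.2 b))) := by
    simp [List.map_flatMap, List.map_map, Function.comp_def]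
  rw [e1, e2]
  exact List.Perm.map _ (by decide)

-- ---- column maxima and the bridge to A's DP ----
def pvCol (M : pvMat) (b : Fin 4) : Option Int :=
  pvVMax (pvVMax (M 0 b) (M 1 b)) (pvVMax (M 2 b) (M 3 b))

theorem pvCol_leaf (r : List Int) (b : Fin 4) :
    pvCol (pvLeaf r) b = some (pvGet r b.val) := by
  fin_cases b <;> simp [pvCol, pvLeaf, pvVMax]

set_option maxHeartbeats 1600000 in
theorem pvCol_combine_leaf (M : pvMat) (u : Int × Int × Int × Int) (r : List Int)
    (h0 : pvCol M 0 = some u.1) (h1 : pvCol M 1 = some u.2.1)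
    (h2 : pvCol M 2 = some u.2.2.1) (h3 : pvCol M 3 = some u.2.2.2) :
    pvCol (pvCombine M (pvLeaf r)) 0 = some (pvStepA u r).1 ∧
    pvCol (pvCombine M (pvLeaf r)) 1 = some (pvStepA u r).2.1 ∧
    pvCol (pvCombine M (pvLeaf r)) 2 = some (pvStepA u r).2.2.1 ∧
    pvCol (pvCombine M (pvLeaf r)) 3 = some (pvStepA u r).2.2.2 := by
  obtain ⟨u0, u1, u2, u3⟩ := u
  simp only [pvStepA]
  simp only [pvCol] at h0 h1 h2 h3
  refine ⟨?_, ?_, ?_, ?_⟩ <;>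
    simp only [pvCol, pvCombine, pvPairs, List.foldl_cons, List.foldl_nil, pvLeaf,
      vmax_none_left, Fin.isValue] <;>
    simp only [Fin.reduceEq, reduceIte, vadd_none_right, vmax_none_left, vmax_none_right] <;>
    simp only [← vadd_vmax_right]
  · rw [show (some (max u1 (max u2 u3) + pvGet r 0) : Option Int)
          = pvVAdd (pvVMax (pvVMax (some u1) (some u2)) (some u3)) (some (pvGet r 0)) from by
        simp [pvVMax, pvVAdd, max_assoc],
      ← h1, ← h2, ← h3]
    congr 1
    simp only [vmax_assoc, vmax_comm, vmax_left_comm]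
  · rw [show (some (max u0 (max u2 u3) + pvGet r 1) : Option Int)
          = pvVAdd (pvVMax (pvVMax (some u0) (some u2)) (some u3)) (some (pvGet r 1)) from by
        simp [pvVMax, pvVAdd, max_assoc],
      ← h0, ← h2, ← h3]
    congr 1
    simp only [vmax_assoc, vmax_comm, vmax_left_comm]
  · rw [show (some (max u0 (max u1 u3) + pvGet r 2) : Option Int)
          = pvVAdd (pvVMax (pvVMax (some u0) (some u1)) (some u3)) (some (pvGet r 2)) from by
        simp [pvVMax, pvVAdd, max_assoc],
      ← h0, ← h1, ← h3]
    congr 1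
    simp only [vmax_assoc, vmax_comm, vmax_left_comm]
  · rw [show (some (max u0 (max u1 u2) + pvGet r 3) : Option Int)
          = pvVAdd (pvVMax (pvVMax (some u0) (some u1)) (some u2)) (some (pvGet r 3)) from by
        simp [pvVMax, pvVAdd, max_assoc],
      ← h0, ← h1, ← h2]
    congr 1
    simp only [vmax_assoc, vmax_comm, vmax_left_comm]

-- ---- pvBlock equals a left-to-right chain of combines with leaves ----
def pvChainFrom (M : pvMat) (l : List (List Int)) : pvMat :=
  l.foldl (fun M r => pvCombine M (pvLeaf r)) M

def pvSpecChain : List (List Int) → pvMat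
  | [] => fun _ _ => none
  | r :: rest => pvChainFrom (pvLeaf r) rest

theorem pvChainFrom_eq (t : List (List Int)) (M : pvMat) (ht : t ≠ []) :
    pvChainFrom M t = pvCombine M (pvSpecChain t) := by
  induction t generalizing M with
  | nil => exact absurd rfl ht
  | cons s t' ih =>
    by_cases h' : t' = []
    · subst h'; rfl
    · have e1 : pvChainFrom M (s :: t') = pvChainFrom (pvCombine M (pvLeaf s)) t' := rfl
      have e2 : pvSpecChain (s :: t') = pvChainFrom (pvLeaf s) t' := rfl
      rw [e1, ih _ h', pvCombine_assoc, e2, ih _ h']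

theorem pvSpecChain_append (l₁ l₂ : List (List Int)) (h₁ : l₁ ≠ []) (h₂ : l₂ ≠ []) :
    pvSpecChain (l₁ ++ l₂) = pvCombine (pvSpecChain l₁) (pvSpecChain l₂) := by
  match l₁ with
  | r :: rest =>
    simp only [List.cons_append, pvSpecChain, pvChainFrom, List.foldl_append]
    rw [show (List.foldl (fun M r => pvCombine M (pvLeaf r)) (pvLeaf r) rest) = pvChainFrom (pvLeaf r) rest from rfl,
        show (List.foldl (fun M r => pvCombine M (pvLeaf r)) (pvChainFrom (pvLeaf r) rest) l₂) = pvChainFrom (pvChainFrom (pvLeaf r) rest) l₂ from rfl]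
    exact pvChainFrom_eq l₂ _ h₂

theorem pvBlock_eq_specChain (rows : List (List Int)) (h : rows ≠ []) :
    pvBlock rows = pvSpecChain rows := by
  induction rows using pvBlock.induct with
  | case1 => exact absurd rfl h
  | case2 r => simp [pvBlock, pvSpecChain, pvChainFrom]
  | case3 r1 r2 rest ih1 ih2 =>
    have htake : (r1 :: r2 :: rest).take ((r1 :: r2 :: rest).length / 2) ≠ [] := by
      simp only [ne_eq, List.take_eq_nil_iff, not_or, List.length_cons]
      refine ⟨by simp, by omega⟩
    have hdrop : (r1 :: r2 :: rest).drop ((r1 :: r2 :: rest).length / 2) ≠ [] := by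
      simp only [ne_eq, List.drop_eq_nil_iff, not_le, List.length_cons]
      omega
    rw [pvBlock, ih1 htake, ih2 hdrop, ← pvSpecChain_append _ _ htake hdrop,
        List.take_append_drop]

-- ---- the chain's column maxima follow A's DP ----
theorem pvChain_col (rest : List (List Int)) (M : pvMat) (u : Int × Int × Int × Int)
    (h0 : pvCol M 0 = some u.1) (h1 : pvCol M 1 = some u.2.1)
    (h2 : pvCol M 2 = some u.2.2.1) (h3 : pvCol M 3 = some u.2.2.2) :
    pvCol (pvChainFrom M rest) 0 = some (rest.foldl pvStepA u).1 ∧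
    pvCol (pvChainFrom M rest) 1 = some (rest.foldl pvStepA u).2.1 ∧
    pvCol (pvChainFrom M rest) 2 = some (rest.foldl pvStepA u).2.2.1 ∧
    pvCol (pvChainFrom M rest) 3 = some (rest.foldl pvStepA u).2.2.2 := by
  induction rest generalizing M u with
  | nil => exact ⟨h0, h1, h2, h3⟩
  | cons r t ih =>
    obtain ⟨g0, g1, g2, g3⟩ := pvCol_combine_leaf M u r h0 h1 h2 h3
    simpa only [pvChainFrom, List.foldl_cons] using ih (pvCombine M (pvLeaf r)) (pvStepA u r) g0 g1 g2 g3

-- ---- the final 16-cell loop groups into column maxima ----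
theorem pvCells_fold_eq (M : pvMat) :
    pvCells.foldl (fun e ab => pvVMax e (M ab.1 ab.2)) none =
    pvVMax (pvVMax (pvCol M 0) (pvCol M 1)) (pvVMax (pvCol M 2) (pvCol M 3)) := by
  simp only [pvCells, List.foldl_cons, List.foldl_nil, vmax_none_left, pvCol]
  simp only [vmax_assoc, vmax_comm, vmax_left_comm]

-- ===== VERDICT (by name: the statement is the Claim_ definition above) =====
theorem solution_spec : Claim_equal_solution := by
  intro land _ hpre
  obtain ⟨hne, -⟩ := hpre
  match land with
  | r0 :: rest =>
    unfold Spec_solution solution solution_alt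
    rw [pvBlock_eq_specChain _ (by simp), pvCells_fold_eq]
    have init0 := pvCol_leaf r0 0
    have init1 := pvCol_leaf r0 1
    have init2 := pvCol_leaf r0 2
    have init3 := pvCol_leaf r0 3
    obtain ⟨c0, c1, c2, c3⟩ :=
      pvChain_col rest (pvLeaf r0) (pvInitA r0) init0 init1 init2 init3
    show _ = (pvVMax (pvVMax (pvCol (pvSpecChain (r0 :: rest)) 0) _) _).getD 0
    simp only [pvSpecChain] at *
    rw [c0, c1, c2, c3]
    obtain ⟨a, b, c, d⟩ := rest.foldl pvStepA (pvInitA r0)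
    simp only [pvVMax, Option.getD_some]
    omega
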